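-- pv_equiv track=rewrite | github.com/bootcamp-algoritmika/ez-python-2.14-practice-2 | second_refactor_task.py | get_most_popular_album
-- ===== SOURCE A (Python) =====
-- def get_most_popular_album(tracks_by_popularity) -> str:
-- 	albums_with_popularity = {}
--
-- 	for track in tracks_by_popularity:
-- 		if track[1] in albums_with_popularity:
-- 			albums_with_popularity[track[1]] += track[3]
-- 		else:
-- 			albums_with_popularity[track[1]] = track[3]
--
-- 	most_popular_album = max(albums_with_popularity, key=albums_with_popularity.get)
-- 	return most_popular_album
-- ===== SOURCE B (Python) =====
-- def get_most_popular_album(tracks_by_popularity) -> str: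
-- 	albums = dict.fromkeys(track[1] for track in tracks_by_popularity)
-- 	return max(albums, key=lambda alb: sum(track[3] for track in tracks_by_popularity if track[1] == alb))
-- ===== Notes on version B (the rewrite author's own statement) =====
-- stated objective: simpler
-- what changed: B drops the running aggregation dict: it takes the unique albums in first-appearance order (dict.fromkeys) and picks the max by re-summing the track list per album.
import Mathlib
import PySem

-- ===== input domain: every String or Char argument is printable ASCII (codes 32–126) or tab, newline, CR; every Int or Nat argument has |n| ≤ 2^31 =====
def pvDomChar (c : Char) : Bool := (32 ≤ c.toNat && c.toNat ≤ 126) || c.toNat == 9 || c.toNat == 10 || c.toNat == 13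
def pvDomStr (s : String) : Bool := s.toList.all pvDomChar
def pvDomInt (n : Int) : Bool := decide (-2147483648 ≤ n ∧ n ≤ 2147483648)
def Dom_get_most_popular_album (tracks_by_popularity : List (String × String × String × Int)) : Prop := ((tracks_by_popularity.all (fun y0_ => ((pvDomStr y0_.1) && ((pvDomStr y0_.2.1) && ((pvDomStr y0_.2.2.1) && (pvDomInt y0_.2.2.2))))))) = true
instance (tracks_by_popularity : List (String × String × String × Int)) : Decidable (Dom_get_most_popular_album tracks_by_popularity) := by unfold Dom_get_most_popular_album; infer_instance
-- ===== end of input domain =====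

-- B is a simpler decomposition (ordered unique albums + per-album re-summation) with the same return
-- value; on the empty list both Pythons raise ValueError (excluded by Pre_).

-- ===== PORT A =====
-- the body of A's for-loop: add the track's popularity under its album key
def pvAggStep (d : PySem.Dict String Int) (track : String × String × String × Int) : PySem.Dict String Int :=
  if d.contains track.2.1 then
    d.insert track.2.1 (d.getD track.2.1 0 + track.2.2.2)
  else
    d.insert track.2.1 track.2.2.2

def get_most_popular_album (tracks_by_popularity : List (String × String × String × Int)) : String :=
  let albums_with_popularity := tracks_by_popularity.foldl pvAggStep PySem.Dict.empty
  -- max(dict, key=dict.get): first key with maximal value; none = ValueError, excluded by Pre_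
  (PySem.List.max? albums_with_popularity.keys
      (fun k => albums_with_popularity.getD k 0)).getD ""

-- ===== PORT B =====
def get_most_popular_album_alt (tracks_by_popularity : List (String × String × String × Int)) : String :=
  let albums := PySem.List.dedup (tracks_by_popularity.map (fun track => track.2.1))
  (PySem.List.max? albums
      (fun alb => ((tracks_by_popularity.filter (fun track => track.2.1 == alb)).map
          (fun track => track.2.2.2)).sum)).getD ""

-- ===== PRECONDITION & SPEC =====
-- Pre_ excludes only the empty list, on which both Pythons raise ValueError from max()
def Pre_get_most_popular_album (tracks_by_popularity : List (String × String × String × Int)) : Prop :=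
  tracks_by_popularity ≠ []
instance (tracks_by_popularity : List (String × String × String × Int)) : Decidable (Pre_get_most_popular_album tracks_by_popularity) := by unfold Pre_get_most_popular_album; infer_instance

def pvWitness_get_most_popular_album : (List (String × String × String × Int)) :=
  [("t1", "alb", "art", 3)]

def Spec_get_most_popular_album (tracks_by_popularity : List (String × String × String × Int)) (out : String) : Prop := out = get_most_popular_album_alt tracks_by_popularity
instance (tracks_by_popularity : List (String × String × String × Int)) (out : String) : Decidable (Spec_get_most_popular_album tracks_by_popularity out) := by unfold Spec_get_most_popular_album; infer_instance

-- ===== CLAIM (what is proved, stated in full; the proofs are below) =====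
def Claim_equal_get_most_popular_album : Prop := ∀ (tracks_by_popularity : List (String × String × String × Int)), Dom_get_most_popular_album tracks_by_popularity → Pre_get_most_popular_album tracks_by_popularity → Spec_get_most_popular_album tracks_by_popularity (get_most_popular_album tracks_by_popularity)

-- ===== LEMMAS AND PROOFS =====

-- B's per-album total
def pvSum (ts : List (String × String × String × Int)) (alb : String) : Int :=
  ((ts.filter (fun track => track.2.1 == alb)).map (fun track => track.2.2.2)).sum

lemma pvSum_append (ts : List (String × String × String × Int)) (t : String × String × String × Int) (alb : String) :
    pvSum (ts ++ [t]) alb = pvSum ts alb + (if t.2.1 = alb then t.2.2.2 else 0) := by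
  simp [pvSum, List.filter_append]
  split_ifs with h <;> simp [h]

-- the aggregation dict's lookup is exactly B's per-album sum
lemma pvAgg_getD (ts : List (String × String × String × Int)) (k : String) :
    (ts.foldl pvAggStep PySem.Dict.empty).getD k 0 = pvSum ts k := by
  induction ts using List.reverseRecOn with
  | nil => simp [pvSum, PySem.Dict.getD, PySem.Dict.get?, PySem.Dict.empty]
  | append_singleton ts t ih =>
    rw [List.foldl_append, pvSum_append, ← ih]
    set d := ts.foldl pvAggStep PySem.Dict.empty with hd
    simp only [List.foldl_cons, List.foldl_nil, pvAggStep]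
    by_cases hc : d.contains t.2.1
    · rw [if_pos hc, PySem.Dict.getD_insert]
      by_cases hk : k = t.2.1
      · rw [if_pos hk, if_pos hk.symm, hk]
      · rw [if_neg hk, if_neg (fun h => hk h.symm)]; omega
    · have h0 : d.getD t.2.1 0 = 0 := by
        rw [PySem.Dict.contains_eq_isSome_get?] at hc
        simp only [PySem.Dict.getD]
        cases hg : d.get? t.2.1 with
        | none => rfl
        | some v => simp [hg] at hc
      rw [if_neg hc, PySem.Dict.getD_insert]
      by_cases hk : k = t.2.1
      · rw [if_pos hk, if_pos hk.symm, hk, h0]; omega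
      · rw [if_neg hk, if_neg (fun h => hk h.symm)]; omega

-- the aggregation dict's keys are the albums in first-appearance order
lemma pvAgg_keys (ts : List (String × String × String × Int)) :
    (ts.foldl pvAggStep PySem.Dict.empty).keys = PySem.List.dedup (ts.map (fun track => track.2.1)) := by
  induction ts using List.reverseRecOn with
  | nil => rfl
  | append_singleton ts t ih =>
    rw [List.foldl_append, List.map_append, PySem.List.dedup]
    simp only [List.map_cons, List.map_nil]
    rw [PySem.Set.ofList_append_singleton, ← PySem.List.dedup, ← ih]
    set d := ts.foldl pvAggStep PySem.Dict.empty with hd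
    simp only [List.foldl_cons, List.foldl_nil, pvAggStep]
    have hmem : d.contains t.2.1 = true ↔ t.2.1 ∈ d.keys := by
      rw [PySem.Dict.contains_eq_decide_mem_keys]; simp
    by_cases hc : d.contains t.2.1
    · rw [if_pos hc, PySem.Dict.keys_insert_of_contains _ _ hc,
        PySem.Set.add_of_mem (hmem.mp hc)]
    · rw [if_neg hc, PySem.Dict.keys_insert_of_not_contains _ _ (by simpa using hc),
        PySem.Set.add_of_not_mem (fun h => hc (hmem.mpr h))]

-- ===== VERDICT (by name: the statement is the Claim_ definition above) =====
theorem get_most_popular_album_spec : Claim_equal_get_most_popular_album := by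
  intro ts _ _
  show get_most_popular_album ts = get_most_popular_album_alt ts
  unfold get_most_popular_album get_most_popular_album_alt
  simp only []
  rw [pvAgg_keys,
    show (fun k => (ts.foldl pvAggStep PySem.Dict.empty).getD k 0)
        = (fun alb => ((ts.filter (fun track => track.2.1 == alb)).map
            (fun track => track.2.2.2)).sum) from
      funext (fun k => pvAgg_getD ts k)]
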